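-- pv_equiv track=rewrite | github.com/sounak95/100_days_of_code | Dynamic Programming/Problems/8_Ninja And The Fence.py | solveSpace
-- ===== SOURCE A (Python) =====
-- MOD = pow(10,9)+7
--
-- def add (a,b):
--     return ((a%MOD) + (b%MOD))% MOD
--
-- def mul (a,b):
--     return ((a%MOD) * (b%MOD))% MOD
--
-- def solveSpace(n,k):
--     prev2 =k
--     if n==1:
--         return prev2
--     if n>1:
--         prev1 =add(k, mul(k,k-1))
--
--     for i in range(3, n+1):
--         ans = add(mul(prev2, k-1), mul(prev1,k-1))
--         prev2= prev1
--         prev1= ans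
--
--     return prev1
-- ===== SOURCE B (Python) =====
-- MOD = pow(10, 9) + 7
--
--
-- def solveSpace(n, k):
--     if n == 1:
--         return k
--     c = (k - 1) % MOD
--     f1 = k % MOD
--     f2 = (k + k * (k - 1)) % MOD
--     # [f(n), f(n-1)] = M^(n-2) @ [f2, f1] with M = [[c, c], [1, 0]],
--     # computed by binary exponentiation (O(log n) instead of A's O(n)).
--     ra, rb, rc, rd = 1, 0, 0, 1
--     ma, mb, mc, md = c, c, 1, 0
--     e = n - 2
--     while e > 0:
--         if e & 1:
--             ra, rb, rc, rd = ((ra * ma + rb * mc) % MOD, (ra * mb + rb * md) % MOD,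
--                               (rc * ma + rd * mc) % MOD, (rc * mb + rd * md) % MOD)
--         ma, mb, mc, md = ((ma * ma + mb * mc) % MOD, (ma * mb + mb * md) % MOD,
--                           (mc * ma + md * mc) % MOD, (mc * mb + md * md) % MOD)
--         e >>= 1
--     return (ra * f2 + rb * f1) % MOD
-- ===== Notes on version B (the rewrite author's own statement) =====
-- stated objective: faster
-- what changed: Replaces A's linear dynamic-programming loop over range(3, n+1) by binary exponentiation of the 2x2 recurrence matrix [[k-1,k-1],[1,0]] mod 10^9+7.
import Mathlib
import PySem

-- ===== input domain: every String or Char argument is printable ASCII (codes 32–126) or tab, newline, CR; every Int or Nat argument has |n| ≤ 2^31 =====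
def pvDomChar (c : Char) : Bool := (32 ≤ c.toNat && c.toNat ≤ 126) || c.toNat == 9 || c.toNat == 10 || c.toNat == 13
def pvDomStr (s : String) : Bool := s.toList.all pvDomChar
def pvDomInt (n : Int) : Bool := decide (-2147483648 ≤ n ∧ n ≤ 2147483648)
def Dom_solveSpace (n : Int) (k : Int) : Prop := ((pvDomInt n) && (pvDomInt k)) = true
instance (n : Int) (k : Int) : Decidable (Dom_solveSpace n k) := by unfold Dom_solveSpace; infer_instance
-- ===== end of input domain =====

-- B replaces A's linear dynamic-programming loop by binary exponentiation of the
-- 2x2 recurrence matrix mod 10^9+7.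

-- ===== PORT A =====
def pvMOD : Int := 1000000007   -- MOD = pow(10,9)+7

def pvAdd (a b : Int) : Int :=
  PySem.Int.mod (PySem.Int.mod a pvMOD + PySem.Int.mod b pvMOD) pvMOD

def pvMul (a b : Int) : Int :=
  PySem.Int.mod (PySem.Int.mod a pvMOD * PySem.Int.mod b pvMOD) pvMOD

def solveSpace (n : Int) (k : Int) : Int :=
  let prev2 := k
  if n = 1 then prev2
  else
    -- for n < 1 Python raises UnboundLocalError (prev1 never assigned); excluded by Pre_
    let prev1 := pvAdd k (pvMul k (k - 1))
    ((PySem.List.pyRange 3 (n + 1) 1).foldl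
      (fun (st : Int × Int) _ =>
        (st.2, pvAdd (pvMul st.1 (k - 1)) (pvMul st.2 (k - 1)))) (prev2, prev1)).2

-- ===== PORT B =====
-- 2x2 matrix (a,b,c,d) product, every entry reduced mod 10^9+7 (as in Source B)
def pvMM (X Y : Int × Int × Int × Int) : Int × Int × Int × Int :=
  (PySem.Int.mod (X.1 * Y.1 + X.2.1 * Y.2.2.1) pvMOD,
   PySem.Int.mod (X.1 * Y.2.1 + X.2.1 * Y.2.2.2) pvMOD,
   PySem.Int.mod (X.2.2.1 * Y.1 + X.2.2.2 * Y.2.2.1) pvMOD,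
   PySem.Int.mod (X.2.2.1 * Y.2.1 + X.2.2.2 * Y.2.2.2) pvMOD)

-- the `while e > 0` binary-exponentiation loop of Source B (on e.toNat; e > 0 ↔ e.toNat ≠ 0)
def pvPowLoop (R M : Int × Int × Int × Int) (e : Nat) : Int × Int × Int × Int :=
  if e = 0 then R
  else pvPowLoop (if e % 2 = 1 then pvMM R M else R) (pvMM M M) (e / 2)
termination_by e
decreasing_by exact Nat.div_lt_self (by omega) one_lt_two

def solveSpace_alt (n : Int) (k : Int) : Int :=
  if n = 1 then k
  else
    let c := PySem.Int.mod (k - 1) pvMOD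
    let f1 := PySem.Int.mod k pvMOD
    let f2 := PySem.Int.mod (k + k * (k - 1)) pvMOD
    let R := pvPowLoop (1, 0, 0, 1) (c, c, 1, 0) (n - 2).toNat
    PySem.Int.mod (R.1 * f2 + R.2.1 * f1) pvMOD

-- ===== PRECONDITION & SPEC =====
-- Pre_ excludes n < 1, where A raises UnboundLocalError (prev1 is never assigned).
def Pre_solveSpace (n : Int) (k : Int) : Prop := 1 ≤ n
instance (n : Int) (k : Int) : Decidable (Pre_solveSpace n k) := by
  unfold Pre_solveSpace; infer_instance

def pvWitness_solveSpace : Int × Int := (5, 3)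

def Spec_solveSpace (n : Int) (k : Int) (out : Int) : Prop := out = solveSpace_alt n k
instance (n : Int) (k : Int) (out : Int) : Decidable (Spec_solveSpace n k out) := by
  unfold Spec_solveSpace; infer_instance

-- ===== CLAIM (what is proved, stated in full; the proofs are below) =====
def Claim_equal_solveSpace : Prop :=
  ∀ (n : Int) (k : Int), Dom_solveSpace n k → Pre_solveSpace n k →
    Spec_solveSpace n k (solveSpace n k)

-- ===== LEMMAS AND PROOFS =====

abbrev pvZ : Type := ZMod 1000000007

theorem pvMOD_pos : (0:Int) < pvMOD := by norm_num [pvMOD]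

theorem pv_pm (a : Int) : PySem.Int.mod a pvMOD = a % pvMOD :=
  PySem.Int.mod_eq_emod_of_pos pvMOD_pos

theorem pv_castMod (a : Int) : ((a % pvMOD : Int) : pvZ) = (a : pvZ) := by
  have h := ZMod.intCast_mod a 1000000007
  simpa [pvMOD] using h

theorem pv_castPMod (a : Int) : ((PySem.Int.mod a pvMOD : Int) : pvZ) = (a : pvZ) := by
  rw [pv_pm]; exact pv_castMod a

theorem pv_castAdd (a b : Int) : ((pvAdd a b : Int) : pvZ) = (a : pvZ) + (b : pvZ) := by
  unfold pvAdd
  rw [pv_castPMod]; push_cast [pv_castPMod]; ring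

theorem pv_castMul (a b : Int) : ((pvMul a b : Int) : pvZ) = (a : pvZ) * (b : pvZ) := by
  unfold pvMul
  rw [pv_castPMod]; push_cast [pv_castPMod]; ring

-- the integer sequence computed by A's loop
def pvG (k : Int) : Nat → Int
  | 0 => k
  | 1 => pvAdd k (pvMul k (k - 1))
  | (m + 2) => pvAdd (pvMul (pvG k m) (k - 1)) (pvMul (pvG k (m + 1)) (k - 1))

-- its shadow over ZMod
def pvGZ (x : pvZ) : Nat → pvZ
  | 0 => x
  | 1 => x + x * (x - 1)
  | (m + 2) => pvGZ x m * (x - 1) + pvGZ x (m + 1) * (x - 1)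

theorem pv_castG (k : Int) : ∀ m, ((pvG k m : Int) : pvZ) = pvGZ (k : pvZ) m := by
  intro m
  induction m using Nat.strong_induction_on with
  | _ m ih =>
    match m with
    | 0 => simp [pvG, pvGZ]
    | 1 => simp only [pvG, pvGZ, pv_castAdd, pv_castMul]; push_cast; ring
    | (m + 2) =>
      simp only [pvG, pvGZ, pv_castAdd, pv_castMul]
      rw [ih m (by omega), ih (m + 1) (by omega)]
      push_cast; ring

theorem pvG_emod (k : Int) : ∀ m, pvG k (m + 1) % pvMOD = pvG k (m + 1) := by
  intro m
  cases m with
  | zero => simp only [pvG, pvAdd, pv_pm]; exact Int.emod_emod_of_dvd _ dvd_rfl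
  | succ m => simp only [pvG, pvAdd, pv_pm]; exact Int.emod_emod_of_dvd _ dvd_rfl

-- a foldl that ignores the list elements is function iteration
theorem pv_foldl_const {α β : Type} (f : β → β) (l : List α) (s : β) :
    l.foldl (fun st _ => f st) s = f^[l.length] s := by
  induction l generalizing s with
  | nil => rfl
  | cons a t ih => simp [List.foldl, ih, Function.iterate_succ_apply]

theorem pv_iterate_step (k : Int) :
    ∀ e m, (fun (st : Int × Int) =>
        (st.2, pvAdd (pvMul st.1 (k - 1)) (pvMul st.2 (k - 1))))^[e]
        (pvG k m, pvG k (m + 1)) = (pvG k (m + e), pvG k (m + e + 1)) := by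
  intro e
  induction e with
  | zero => intro m; simp
  | succ e ih =>
    intro m
    rw [Function.iterate_succ_apply]
    have h1 : ((pvG k m, pvG k (m + 1)).2,
        pvAdd (pvMul (pvG k m, pvG k (m + 1)).1 (k - 1))
          (pvMul (pvG k m, pvG k (m + 1)).2 (k - 1)))
        = (pvG k (m + 1), pvG k (m + 1 + 1)) := rfl
    rw [h1]
    have h2 := ih (m + 1)
    have e1 : m + 1 + e = m + (e + 1) := by omega
    rw [e1] at h2
    exact h2

-- A's value for n ≥ 2
theorem pv_A_char (n k : Int) (hn : 2 ≤ n) :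
    solveSpace n k = pvG k ((n - 2).toNat + 1) := by
  simp only [solveSpace, if_neg (show ¬ n = 1 by omega)]
  have hlen : (PySem.List.pyRange 3 (n + 1) 1).length = (n - 2).toNat := by
    rw [PySem.List.length_pyRange_one]
    congr 1; omega
  rw [pv_foldl_const, hlen]
  have h0 : ((k : Int), pvAdd k (pvMul k (k - 1))) = (pvG k 0, pvG k (0 + 1)) := by
    simp [pvG]
  rw [h0, pv_iterate_step k ((n - 2).toNat) 0]
  simp

-- ZMod-side 2x2 matrices
def pvMMZ (X Y : pvZ × pvZ × pvZ × pvZ) : pvZ × pvZ × pvZ × pvZ :=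
  (X.1 * Y.1 + X.2.1 * Y.2.2.1, X.1 * Y.2.1 + X.2.1 * Y.2.2.2,
   X.2.2.1 * Y.1 + X.2.2.2 * Y.2.2.1, X.2.2.1 * Y.2.1 + X.2.2.2 * Y.2.2.2)

def pvPowZ (M : pvZ × pvZ × pvZ × pvZ) : Nat → pvZ × pvZ × pvZ × pvZ
  | 0 => (1, 0, 0, 1)
  | (e + 1) => pvMMZ M (pvPowZ M e)

def pvCastM (X : Int × Int × Int × Int) : pvZ × pvZ × pvZ × pvZ :=
  ((X.1 : pvZ), (X.2.1 : pvZ), (X.2.2.1 : pvZ), (X.2.2.2 : pvZ))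

theorem pv_castMM (X Y : Int × Int × Int × Int) :
    pvCastM (pvMM X Y) = pvMMZ (pvCastM X) (pvCastM Y) := by
  simp only [pvMM, pvMMZ, pvCastM, pv_castPMod]
  push_cast; rfl

theorem pv_mmz_assoc (X Y Z : pvZ × pvZ × pvZ × pvZ) :
    pvMMZ (pvMMZ X Y) Z = pvMMZ X (pvMMZ Y Z) := by
  obtain ⟨a, b, c, d⟩ := X; obtain ⟨e, f, g, h⟩ := Y; obtain ⟨i, j, l, m⟩ := Z
  simp only [pvMMZ, Prod.mk.injEq]
  refine ⟨by ring, by ring, by ring, by ring⟩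

theorem pv_mmz_one_left (X : pvZ × pvZ × pvZ × pvZ) : pvMMZ (1, 0, 0, 1) X = X := by
  obtain ⟨a, b, c, d⟩ := X
  simp [pvMMZ]

theorem pv_mmz_one_right (X : pvZ × pvZ × pvZ × pvZ) : pvMMZ X (1, 0, 0, 1) = X := by
  obtain ⟨a, b, c, d⟩ := X
  simp [pvMMZ]

theorem pv_powZ_sq (M : pvZ × pvZ × pvZ × pvZ) (q : Nat) :
    pvPowZ (pvMMZ M M) q = pvPowZ M (2 * q) := by
  induction q with
  | zero => rfl
  | succ q ih =>
    have h2 : 2 * (q + 1) = 2 * q + 1 + 1 := by omega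
    rw [h2]
    simp only [pvPowZ, ih, pv_mmz_assoc]

-- binary exponentiation computes R · M^e (over the ZMod shadow)
theorem pv_loopZ : ∀ e (R M : Int × Int × Int × Int),
    pvCastM (pvPowLoop R M e) = pvMMZ (pvCastM R) (pvPowZ (pvCastM M) e) := by
  intro e
  induction e using Nat.strong_induction_on with
  | _ e ih =>
    intro R M
    rw [pvPowLoop]
    by_cases he : e = 0
    · simp [he, pvPowZ, pv_mmz_one_right]
    · rw [if_neg he, ih (e / 2) (Nat.div_lt_self (by omega) one_lt_two), pv_castMM,
        pv_powZ_sq]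
      by_cases hp : e % 2 = 1
      · rw [if_pos hp, pv_castMM]
        have he2 : e = 2 * (e / 2) + 1 := by omega
        conv_rhs => rw [he2]
        rw [show pvPowZ (pvCastM M) (2 * (e / 2) + 1)
            = pvMMZ (pvCastM M) (pvPowZ (pvCastM M) (2 * (e / 2))) from rfl]
        rw [pv_mmz_assoc]
      · rw [if_neg hp]
        have he2 : 2 * (e / 2) = e := by omega
        rw [he2]

-- the recurrence matrix power reproduces the sequence pvGZ
theorem pv_powG (x : pvZ) : ∀ e,
    (pvPowZ (x - 1, x - 1, 1, 0) e).1 * pvGZ x 1 +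
      (pvPowZ (x - 1, x - 1, 1, 0) e).2.1 * pvGZ x 0 = pvGZ x (e + 1) ∧
    (pvPowZ (x - 1, x - 1, 1, 0) e).2.2.1 * pvGZ x 1 +
      (pvPowZ (x - 1, x - 1, 1, 0) e).2.2.2 * pvGZ x 0 = pvGZ x e := by
  intro e
  induction e with
  | zero => simp [pvPowZ, pvGZ]
  | succ e ih =>
    obtain ⟨ih1, ih2⟩ := ih
    set P := pvPowZ (x - 1, x - 1, 1, 0) e with hP
    have hstep : pvPowZ (x - 1, x - 1, 1, 0) (e + 1)
        = ((x - 1) * P.1 + (x - 1) * P.2.2.1, (x - 1) * P.2.1 + (x - 1) * P.2.2.2,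
           1 * P.1 + 0 * P.2.2.1, 1 * P.2.1 + 0 * P.2.2.2) := by
      rw [pvPowZ, ← hP]; rfl
    rw [hstep]
    constructor
    · have hr : ((x - 1) * P.1 + (x - 1) * P.2.2.1) * pvGZ x 1 +
          ((x - 1) * P.2.1 + (x - 1) * P.2.2.2) * pvGZ x 0
          = (P.1 * pvGZ x 1 + P.2.1 * pvGZ x 0) * (x - 1) +
            (P.2.2.1 * pvGZ x 1 + P.2.2.2 * pvGZ x 0) * (x - 1) := by ring
      rw [hr, ih1, ih2]
      show _ = pvGZ x (e + 2)
      rw [pvGZ]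
      ring
    · have hr : (1 * P.1 + 0 * P.2.2.1) * pvGZ x 1 + (1 * P.2.1 + 0 * P.2.2.2) * pvGZ x 0
          = P.1 * pvGZ x 1 + P.2.1 * pvGZ x 0 := by ring
      rw [hr, ih1]

-- B's value for n ≥ 2: its ZMod shadow and its reducedness
theorem pv_B_char (n k : Int) (hn : 2 ≤ n) :
    ((solveSpace_alt n k : Int) : pvZ) = pvGZ (k : pvZ) ((n - 2).toNat + 1) ∧
    solveSpace_alt n k % pvMOD = solveSpace_alt n k := by
  have hB : solveSpace_alt n k =
      PySem.Int.mod
        ((pvPowLoop (1, 0, 0, 1)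
            (PySem.Int.mod (k - 1) pvMOD, PySem.Int.mod (k - 1) pvMOD, 1, 0)
            (n - 2).toNat).1 * PySem.Int.mod (k + k * (k - 1)) pvMOD +
         (pvPowLoop (1, 0, 0, 1)
            (PySem.Int.mod (k - 1) pvMOD, PySem.Int.mod (k - 1) pvMOD, 1, 0)
            (n - 2).toNat).2.1 * PySem.Int.mod k pvMOD) pvMOD := by
    simp only [solveSpace_alt, if_neg (show ¬ n = 1 by omega)]
  constructor
  · rw [hB, pv_castPMod]
    push_cast
    have hC : pvCastM (pvPowLoop (1, 0, 0, 1)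
        (PySem.Int.mod (k - 1) pvMOD, PySem.Int.mod (k - 1) pvMOD, 1, 0) (n - 2).toNat)
        = pvPowZ ((k : pvZ) - 1, (k : pvZ) - 1, 1, 0) (n - 2).toNat := by
      rw [pv_loopZ]
      have h1 : pvCastM (1, 0, 0, 1) = ((1 : pvZ), 0, 0, 1) := by
        simp [pvCastM]
      have h2 : pvCastM (PySem.Int.mod (k - 1) pvMOD, PySem.Int.mod (k - 1) pvMOD, 1, 0)
          = ((k : pvZ) - 1, (k : pvZ) - 1, 1, 0) := by
        simp [pvCastM, pv_castPMod]
      rw [h1, h2, pv_mmz_one_left]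
    have hc1 : ((pvPowLoop (1, 0, 0, 1)
        (PySem.Int.mod (k - 1) pvMOD, PySem.Int.mod (k - 1) pvMOD, 1, 0)
        (n - 2).toNat).1 : pvZ)
        = (pvPowZ ((k : pvZ) - 1, (k : pvZ) - 1, 1, 0) (n - 2).toNat).1 := by
      rw [← hC]; rfl
    have hc2 : ((pvPowLoop (1, 0, 0, 1)
        (PySem.Int.mod (k - 1) pvMOD, PySem.Int.mod (k - 1) pvMOD, 1, 0)
        (n - 2).toNat).2.1 : pvZ)
        = (pvPowZ ((k : pvZ) - 1, (k : pvZ) - 1, 1, 0) (n - 2).toNat).2.1 := by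
      rw [← hC]; rfl
    rw [pv_castPMod, pv_castPMod, hc1, hc2]
    have hg := (pv_powG (k : pvZ) (n - 2).toNat).1
    have hf2 : ((k : pvZ) + (k : pvZ) * ((k : pvZ) - 1)) = pvGZ (k : pvZ) 1 := by
      rw [pvGZ]
    have hf1 : (k : pvZ) = pvGZ (k : pvZ) 0 := by rw [pvGZ]
    push_cast
    rw [hf2]
    calc (pvPowZ ((k : pvZ) - 1, (k : pvZ) - 1, 1, 0) (n - 2).toNat).1 * pvGZ (k : pvZ) 1 +
          (pvPowZ ((k : pvZ) - 1, (k : pvZ) - 1, 1, 0) (n - 2).toNat).2.1 * (k : pvZ)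
        = (pvPowZ ((k : pvZ) - 1, (k : pvZ) - 1, 1, 0) (n - 2).toNat).1 * pvGZ (k : pvZ) 1 +
          (pvPowZ ((k : pvZ) - 1, (k : pvZ) - 1, 1, 0) (n - 2).toNat).2.1 * pvGZ (k : pvZ) 0 := by
          rw [← hf1]
      _ = pvGZ (k : pvZ) ((n - 2).toNat + 1) := hg
  · rw [hB]
    simp only [pv_pm]
    exact Int.emod_emod_of_dvd _ dvd_rfl

-- two mod-reduced integers with equal ZMod shadows are equal
theorem pv_eq_of_cast (x y : Int) (hx : x % pvMOD = x) (hy : y % pvMOD = y)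
    (h : (x : pvZ) = (y : pvZ)) : x = y := by
  have h2 : x % ((1000000007 : Nat) : Int) = y % ((1000000007 : Nat) : Int) :=
    (ZMod.intCast_eq_intCast_iff' x y 1000000007).mp h
  have h3 : ((1000000007 : Nat) : Int) = pvMOD := by norm_num [pvMOD]
  rw [h3, hx, hy] at h2
  exact h2

-- ===== VERDICT (by name: the statement is the Claim_ definition above) =====
theorem solveSpace_spec : Claim_equal_solveSpace := by
  intro n k _ hpre
  unfold Spec_solveSpace
  by_cases h1 : n = 1
  · subst h1
    simp [solveSpace, solveSpace_alt]
  · have hn : 2 ≤ n := by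
      have : 1 ≤ n := hpre
      omega
    obtain ⟨hBc, hBm⟩ := pv_B_char n k hn
    have hA := pv_A_char n k hn
    have hAm : solveSpace n k % pvMOD = solveSpace n k := by
      rw [hA]; exact pvG_emod k _
    apply pv_eq_of_cast _ _ hAm hBm
    rw [hA, pv_castG, hBc]
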